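-- pv_equiv track=rewrite | github.com/thealper2/codewars-solutions | 7-kyu/bobs_short_forms.py | short_form
-- ===== SOURCE A (Python) =====
-- def short_form(s):
--     result = ""
--     n = len(s)
--     for i in range(n):
--         if i == 0 or i == n - 1:
--             result += s[i]
--         elif s[i] not in "aeiouAEIOU":
--             result += s[i]
--
--     return result
-- ===== SOURCE B (Python) =====
-- _DELETE_VOWELS = str.maketrans('', '', 'aeiouAEIOU')
--
-- def short_form(s):
--     if len(s) <= 1:
--         return s
--     # Delete vowels from the WHOLE string in one translate pass,
--     # then repair the two end characters if they were vowels.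
--     t = s.translate(_DELETE_VOWELS)
--     head = s[0] if s[0] in 'aeiouAEIOU' else ''
--     tail = s[-1] if s[-1] in 'aeiouAEIOU' else ''
--     return head + t + tail
-- ===== Notes on version B (the rewrite author's own statement) =====
-- stated objective: faster
-- what changed: Instead of a per-index loop with i==0/i==n-1 boundary tests and repeated string concatenation, B deletes vowels from the whole string in one C-level str.translate pass and then repairs the two boundary characters, prepending/appending them only if they were vowels.
import Mathlib
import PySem

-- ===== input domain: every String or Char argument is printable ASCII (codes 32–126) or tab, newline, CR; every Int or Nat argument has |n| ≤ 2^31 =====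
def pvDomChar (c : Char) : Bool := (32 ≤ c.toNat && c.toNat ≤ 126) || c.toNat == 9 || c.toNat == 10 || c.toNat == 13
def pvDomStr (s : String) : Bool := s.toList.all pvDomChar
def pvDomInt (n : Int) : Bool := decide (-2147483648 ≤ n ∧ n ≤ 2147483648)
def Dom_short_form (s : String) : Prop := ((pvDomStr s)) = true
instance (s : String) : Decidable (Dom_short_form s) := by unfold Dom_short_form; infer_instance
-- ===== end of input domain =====

-- B deletes vowels from the whole string in one translate pass and then repairs the two boundary
-- characters (re-attaching them only if they were vowels), instead of an index loop with boundary tests.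

def pvVowels : List Char := "aeiouAEIOU".toList

-- ===== PORT A =====
-- result = ""; for i in range(n): if i == 0 or i == n-1: result += s[i]; elif s[i] not in vowels: result += s[i]
def short_form (s : String) : String :=
  let cs := s.toList
  let n : Int := PySem.Chars.len cs
  let result :=
    (PySem.List.pyRange 0 n 1).foldl (fun result i =>
      if i = 0 ∨ i = n - 1 then result ++ [PySem.List.pyGetD cs i ' ']
      else if pvVowels.contains (PySem.List.pyGetD cs i ' ') = false then
        result ++ [PySem.List.pyGetD cs i ' ']
      else result) []
  String.ofList result

-- ===== PORT B =====
-- if len(s) <= 1: return s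
-- t = s.translate(delete 'aeiouAEIOU')   -- a delete-table translate is exactly a filter over the chars
-- head = s[0] if s[0] in vowels else ''; tail = s[-1] if s[-1] in vowels else ''
-- return head + t + tail
def short_form_alt (s : String) : String :=
  let cs := s.toList
  if cs.length ≤ 1 then s
  else
    let t := cs.filter (fun c => !pvVowels.contains c)
    let head := if pvVowels.contains (PySem.List.pyGetD cs 0 ' ') then [PySem.List.pyGetD cs 0 ' '] else []
    let tail := if pvVowels.contains (PySem.List.pyGetD cs (-1) ' ') then [PySem.List.pyGetD cs (-1) ' '] else []
    String.ofList (head ++ t ++ tail)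

-- ===== PRECONDITION & SPEC =====
def Spec_short_form (s : String) (out : String) : Prop := out = short_form_alt s
instance (s : String) (out : String) : Decidable (Spec_short_form s out) := by unfold Spec_short_form; infer_instance

-- ===== CLAIM (what is proved, stated in full; the proofs are below) =====
def Claim_equal_short_form : Prop := ∀ (s : String), Dom_short_form s → Spec_short_form s (short_form s)

-- ===== LEMMAS AND PROOFS =====

-- flatMap over indices with a keep-test is filter
lemma pv_flatMap_range_filter (p : Char → Bool) (d : Char) :
    ∀ (l : List Char),
      (List.range l.length).flatMap
        (fun i => if p (l.getD i d) then [l.getD i d] else []) = l.filter p := by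
  intro l
  induction l with
  | nil => simp
  | cons a l ih =>
    simp only [List.length_cons, List.range_succ_eq_map, List.flatMap_cons, List.flatMap_map]
    simp only [List.getD_cons_zero, List.getD_cons_succ, Nat.succ_eq_add_one]
    rw [List.filter_cons]
    by_cases hp : p a
    · simp only [hp, if_pos, List.getD_eq_getElem?_getD] at ih ⊢
      simp [ih]
    · simp only [hp, List.getD_eq_getElem?_getD] at ih ⊢
      simp [ih]

lemma pv_foldl_eq_flatMap {α β : Type} (f : List β → α → List β) (g : α → List β)
    (hfg : ∀ acc x, f acc x = acc ++ g x) :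
    ∀ (l : List α) (acc : List β), l.foldl f acc = acc ++ l.flatMap g := by
  intro l
  induction l with
  | nil => simp
  | cons x l ih => intro acc; rw [List.foldl_cons, hfg, ih, List.flatMap_cons]; simp

-- B's "filter whole string, then repair the ends" equals "keep ends, filter the interior"
lemma pv_patch (cs : List Char) (h : 2 ≤ cs.length) :
    (if pvVowels.contains (PySem.List.pyGetD cs 0 ' ') then [PySem.List.pyGetD cs 0 ' '] else [])
      ++ cs.filter (fun c => !pvVowels.contains c)
      ++ (if pvVowels.contains (PySem.List.pyGetD cs (-1) ' ') then [PySem.List.pyGetD cs (-1) ' '] else [])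
    = [PySem.List.pyGetD cs 0 ' ']
      ++ ((cs.drop 1).take (cs.length - 2)).filter (fun c => !pvVowels.contains c)
      ++ [PySem.List.pyGetD cs (-1) ' '] := by
  obtain ⟨a, rest, rfl⟩ : ∃ a rest, cs = a :: rest := by
    cases cs with
    | nil => simp at h
    | cons a rest => exact ⟨a, rest, rfl⟩
  have hrne : rest ≠ [] := by
    rintro rfl; simp at h
  obtain ⟨mid, b, rfl⟩ : ∃ mid b, rest = mid ++ [b] :=
    ⟨rest.dropLast, rest.getLast hrne, (List.dropLast_append_getLast hrne).symm⟩
  have h0 : PySem.List.pyGetD (a :: (mid ++ [b])) 0 ' ' = a := by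
    have hnn : (0 : Int) ≤ (mid.length : Int) + 1 := by positivity
    simp [PySem.List.pyGetD, PySem.List.pyGet?, PySem.List.pyIdx?, hnn]
  have hlast : PySem.List.pyGetD (a :: (mid ++ [b])) (-1) ' ' = b := by
    rw [PySem.List.pyGetD_neg_ofNat _ 1 ' ' (by omega) (by simp)]
    simp
  have hmid : ((a :: (mid ++ [b])).drop 1).take ((a :: (mid ++ [b])).length - 2) = mid := by
    simp
  rw [h0, hlast, hmid]
  simp only [List.filter_cons, List.filter_append, List.filter_cons, List.filter_nil]
  by_cases hva : a ∈ pvVowels <;> by_cases hvb : b ∈ pvVowels <;> simp [hva, hvb]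

-- ===== VERDICT (by name: the statement is the Claim_ definition above) =====
theorem short_form_spec : Claim_equal_short_form := by
  unfold Claim_equal_short_form Spec_short_form
  intro s _
  unfold short_form short_form_alt
  simp only [PySem.Chars.len_eq]
  have hS : String.ofList s.toList = s := by simp
  generalize hcs : s.toList = cs at hS ⊢
  by_cases h1 : cs.length ≤ 1
  · rw [if_pos h1]
    cases cs with
    | nil => simpa [PySem.List.pyRange] using hS
    | cons a tl =>
      cases tl with
      | nil =>
        simpa [PySem.List.pyRange_zero_natCast 1, List.range_succ] using hS
      | cons b t => simp at h1
  · push_neg at h1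
    simp only [if_neg (by omega : ¬ cs.length ≤ 1)]
    rw [pv_foldl_eq_flatMap _
        (fun i : Int => if i = 0 ∨ i = (cs.length : Int) - 1 then [PySem.List.pyGetD cs i ' ']
          else if pvVowels.contains (PySem.List.pyGetD cs i ' ') = false then
            [PySem.List.pyGetD cs i ' ']
          else [])
        (by
          intro acc i
          beta_reduce
          by_cases h0 : i = 0 ∨ i = (cs.length : Int) - 1
          · rw [if_pos h0, if_pos h0]
          · rw [if_neg h0, if_neg h0]
            by_cases hv : pvVowels.contains (PySem.List.pyGetD cs i ' ') = false
            · rw [if_pos hv, if_pos hv]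
            · rw [if_neg hv, if_neg hv, List.append_nil])]
    rw [PySem.List.pyRange_zero_natCast cs.length, List.flatMap_map, List.nil_append]
    rw [pv_patch cs (by omega)]
    -- decompose range: n = m + 2
    obtain ⟨m, hm⟩ : ∃ m, cs.length = m + 2 := ⟨cs.length - 2, by omega⟩
    congr 1
    rw [hm, List.range_succ_eq_map, List.range_succ, List.flatMap_cons, List.map_append,
        List.flatMap_append, List.flatMap_map]
    have hget : ∀ (k : Nat), k < cs.length → PySem.List.pyGetD cs (k : Int) ' ' = cs.getD k ' ' := by
      intro k _; simp [PySem.List.pyGetD_natCast]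
    -- head piece
    have h0 : (((0 : Nat) : Int) = 0 ∨ ((0 : Nat) : Int) = (((m + 2 : Nat)) : Int) - 1) :=
      Or.inl (by norm_num)
    -- last piece
    have hlast : (((Nat.succ m : Nat) : Int) = 0 ∨ ((Nat.succ m : Nat) : Int) = (((m + 2 : Nat)) : Int) - 1) :=
      Or.inr (by push_cast; ring)
    -- middle piece
    have hmid : ∀ i ∈ List.range m,
        (if ((Nat.succ i : Nat) : Int) = 0 ∨ ((Nat.succ i : Nat) : Int) = (((m + 2 : Nat)) : Int) - 1 then
          [PySem.List.pyGetD cs ((Nat.succ i : Nat) : Int) ' ']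
        else if pvVowels.contains (PySem.List.pyGetD cs ((Nat.succ i : Nat) : Int) ' ') = false then
          [PySem.List.pyGetD cs ((Nat.succ i : Nat) : Int) ' ']
        else [])
        = (if (!pvVowels.contains (((cs.drop 1).take m).getD i ' ')) = true then
            [((cs.drop 1).take m).getD i ' '] else []) := by
      intro i hi
      rw [List.mem_range] at hi
      have hne : ¬ (((Nat.succ i : Nat) : Int) = 0 ∨ ((Nat.succ i : Nat) : Int) = (((m + 2 : Nat)) : Int) - 1) := by
        push_cast; omega
      have hidx : ((cs.drop 1).take m).getD i ' ' = cs.getD (i + 1) ' ' := by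
        have hl1 : i < ((cs.drop 1).take m).length := by
          rw [List.length_take, List.length_drop]; omega
        have hl2 : i + 1 < cs.length := by omega
        rw [List.getD_eq_getElem _ _ hl1, List.getD_eq_getElem _ _ hl2]
        simp [List.getElem_take]
      rw [if_neg hne, hget (Nat.succ i) (by omega), hidx]
      by_cases hv : pvVowels.contains (cs.getD (i + 1) ' ')
      · simp [hv, Nat.succ_eq_add_one]
      · simp [hv, Nat.succ_eq_add_one]
    have hfilt := pv_flatMap_range_filter (fun c => !pvVowels.contains c) ' ' ((cs.drop 1).take m)
    rw [show ((cs.drop 1).take m).length = m from by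
          rw [List.length_take, List.length_drop]; omega] at hfilt
    have hgl : PySem.List.pyGetD cs (-1) ' ' = cs.getD (m + 1) ' ' := by
      rw [PySem.List.pyGetD_neg_ofNat cs 1 ' ' (by omega) (by omega)]
      rw [List.getD_eq_getElem _ _ (by omega : m + 1 < cs.length)]
      simp [show cs.length - 1 = m + 1 from by omega]
    simp only [List.map_cons, List.map_nil, List.flatMap_cons, List.flatMap_nil, List.append_nil,
      if_pos h0, if_pos hlast]
    rw [List.flatMap_congr hmid, hfilt, hgl,
        hget (Nat.succ m) (by omega), show m + 2 - 2 = m from by omega,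
        show ((0 : Nat) : Int) = (0 : Int) from by norm_num,
        show PySem.List.pyGetD cs 0 ' ' = cs.getD 0 ' ' from by simpa using hget 0 (by omega)]
    simp [Nat.succ_eq_add_one]
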